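-- pv_equiv track=rewrite | github.com/alboismoreau/algoritmos-I-python | guia7.py | cuenta_bancaria
-- ===== SOURCE A (Python) =====
-- def cuenta_bancaria(historial:[(str,int)]) -> int:
--    saldo : int = 0
--    for t in historial:
--       if t[0] == 'I':
--          saldo += t[1]
--       if t[0] == 'R':
--          saldo -= t[1]
--          return saldo
-- ===== SOURCE B (Python) =====
-- def cuenta_bancaria(historial):
--     i = next((k for k, t in enumerate(historial) if t[0] == 'R'), None)
--     if i is None:
--         return None
--     return sum(t[1] for t in historial[:i] if t[0] == 'I') - historial[i][1]
-- ===== Notes on version B (the rewrite author's own statement) =====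
-- stated objective: alternative
-- what changed: Replaces the running-accumulator loop with early return by a two-phase locate-then-summarize: find the index of the first 'R' transaction, then sum the 'I' amounts in the prefix before it and subtract that withdrawal.
import Mathlib
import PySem

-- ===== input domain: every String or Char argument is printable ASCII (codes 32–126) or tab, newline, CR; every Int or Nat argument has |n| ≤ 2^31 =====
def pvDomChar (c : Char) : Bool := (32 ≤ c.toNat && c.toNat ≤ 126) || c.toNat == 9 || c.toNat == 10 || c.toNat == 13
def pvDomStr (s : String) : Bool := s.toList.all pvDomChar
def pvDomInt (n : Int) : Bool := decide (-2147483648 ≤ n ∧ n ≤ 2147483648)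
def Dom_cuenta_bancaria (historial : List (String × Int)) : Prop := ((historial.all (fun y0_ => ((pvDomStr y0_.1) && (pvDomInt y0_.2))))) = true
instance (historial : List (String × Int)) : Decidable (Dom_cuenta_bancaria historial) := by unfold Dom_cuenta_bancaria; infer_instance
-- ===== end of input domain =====

-- B replaces the accumulator loop + early return by locate-first-'R' then prefix-sum; objective: alternative decomposition.


-- ===== PORT A =====
-- the for-loop with accumulator `saldo` and early return, as structural recursion
def cuenta_bancaria_go (saldo : Int) : List (String × Int) → Option Int
  | [] => none
  | t :: rest =>
    let saldo' := if t.1 == "I" then saldo + t.2 else saldo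
    if t.1 == "R" then some (saldo' - t.2) else cuenta_bancaria_go saldo' rest

def cuenta_bancaria (historial : List (String × Int)) : Option Int :=
  cuenta_bancaria_go 0 historial

-- ===== PORT B =====
def cuenta_bancaria_alt (historial : List (String × Int)) : Option Int :=
  match historial.findIdx? (fun t => t.1 == "R") with
  | none => none
  | some i =>
    some ((((historial.take i).filter (fun t => t.1 == "I")).map Prod.snd).sum
          - (historial.getD i ("", 0)).2)

-- ===== PRECONDITION & SPEC =====
def Spec_cuenta_bancaria (historial : List (String × Int)) (out : Option Int) : Prop := out = cuenta_bancaria_alt historial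
instance (historial : List (String × Int)) (out : Option Int) : Decidable (Spec_cuenta_bancaria historial out) := by unfold Spec_cuenta_bancaria; infer_instance

-- ===== CLAIM (what is proved, stated in full; the proofs are below) =====
def Claim_equal_cuenta_bancaria : Prop := ∀ (historial : List (String × Int)), Dom_cuenta_bancaria historial → Spec_cuenta_bancaria historial (cuenta_bancaria historial)

-- ===== LEMMAS AND PROOFS =====

theorem cuenta_bancaria_go_eq (l : List (String × Int)) :
    ∀ s, cuenta_bancaria_go s l = (cuenta_bancaria_alt l).map (fun v => s + v) := by
  induction l with
  | nil => intro s; simp [cuenta_bancaria_go, cuenta_bancaria_alt]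
  | cons t rest ih =>
    intro s
    by_cases hR : t.1 = "R"
    · simp [cuenta_bancaria_go, cuenta_bancaria_alt, hR, List.findIdx?_cons]
      ring
    · by_cases hI : t.1 = "I"
      · simp [cuenta_bancaria_go, cuenta_bancaria_alt, hI, List.findIdx?_cons, ih]
        cases h : rest.findIdx? (fun t => t.1 == "R") with
        | none => simp
        | some i => simp [hI]; ring
      · simp [cuenta_bancaria_go, cuenta_bancaria_alt, hR, hI, List.findIdx?_cons, ih]
        cases h : rest.findIdx? (fun t => t.1 == "R") with
        | none => simp
        | some i => simp [hI]

-- ===== VERDICT (by name: the statement is the Claim_ definition above) =====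
theorem cuenta_bancaria_spec : Claim_equal_cuenta_bancaria := by
  intro historial _
  unfold Spec_cuenta_bancaria cuenta_bancaria
  rw [cuenta_bancaria_go_eq]
  cases cuenta_bancaria_alt historial <;> simp
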